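-- pv_equiv track=rewrite | github.com/mgirardis/mossy-cell-dg | modules/input.py | fix_par_name
-- ===== SOURCE A (Python) =====
-- def fix_par_name(p):
--     if len(p) == 1:
--         return p
--     else:
--         if p[0] == '-':
--             return fix_par_name(p[1:])
--         else:
--             return p
-- ===== SOURCE B (Python) =====
-- def fix_par_name(p):
--     # arithmetic instead of recursion: count leading dashes, but keep at
--     # least the last character (A stops stripping at length 1)
--     d = len(p) - len(p.lstrip('-'))
--     return p[min(d, len(p) - 1):]
-- ===== Notes on version B (the rewrite author's own statement) =====
-- stated objective: idiomatic
-- what changed: Replaces A's tail recursion on p[1:] by a non-recursive computation: count the leading dashes with lstrip and take one slice, capped so the last character survives.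
import Mathlib
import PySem

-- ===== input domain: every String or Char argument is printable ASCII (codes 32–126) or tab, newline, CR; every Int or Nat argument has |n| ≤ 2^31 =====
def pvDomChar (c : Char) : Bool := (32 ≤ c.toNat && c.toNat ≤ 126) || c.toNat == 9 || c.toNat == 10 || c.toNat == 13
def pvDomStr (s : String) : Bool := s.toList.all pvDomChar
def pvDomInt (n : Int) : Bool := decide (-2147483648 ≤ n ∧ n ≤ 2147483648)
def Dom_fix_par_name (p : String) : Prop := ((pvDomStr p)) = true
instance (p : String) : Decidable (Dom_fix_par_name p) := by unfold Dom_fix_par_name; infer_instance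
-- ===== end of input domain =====

-- Strips leading '-' from a parameter name (keeping the last character even if it is '-').
-- B replaces A's tail recursion by counting the leading dashes and taking one capped slice.


-- ===== PORT A =====
-- A's recursion over the string's characters: len(p)==1 returns p; else if p[0]=='-' recurse on p[1:]; else return p.
def fixAList : List Char → List Char
  | [] => []                    -- Python A raises IndexError here; excluded by Pre_
  | [c] => [c]                  -- len(p) == 1
  | c :: d :: rest => if c = '-' then fixAList (d :: rest) else c :: d :: rest

def fix_par_name (p : String) : String := String.ofList (fixAList p.toList)

-- ===== PORT B =====
-- d = len(p) - len(p.lstrip('-')); return p[min(d, len(p)-1):]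
-- lstrip('-') with an explicit char set is ported by hand as dropWhile (· = '-'); exact on all strings.
def fix_par_name_alt (p : String) : String :=
  let l := p.toList
  let d : Int := (l.length : Int) - ((l.dropWhile (fun c => c = '-')).length : Int)
  String.ofList (PySem.List.slice l (some (min d ((l.length : Int) - 1))) none)

-- ===== PRECONDITION & SPEC =====
-- Pre_ excludes only the empty string, on which A raises IndexError (p[0]).
def Pre_fix_par_name (p : String) : Prop := p ≠ ""
instance (p : String) : Decidable (Pre_fix_par_name p) := by unfold Pre_fix_par_name; infer_instance
def pvWitness_fix_par_name : String := "--flag"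

def Spec_fix_par_name (p : String) (out : String) : Prop := out = fix_par_name_alt p
instance (p : String) (out : String) : Decidable (Spec_fix_par_name p out) := by unfold Spec_fix_par_name; infer_instance

-- ===== CLAIM (what is proved, stated in full; the proofs are below) =====
def Claim_equal_fix_par_name : Prop := ∀ (p : String), Dom_fix_par_name p → Pre_fix_par_name p → Spec_fix_par_name p (fix_par_name p)

-- ===== LEMMAS AND PROOFS =====

-- A's recursion computes: drop the leading dashes, capped so the last character survives.
theorem fixA_eq (l : List Char) :
    fixAList l = l.drop (min (l.takeWhile (fun c => c = '-')).length (l.length - 1)) := by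
  match l with
  | [] => simp [fixAList]
  | [c] => simp [fixAList]
  | c :: d :: rest =>
    by_cases h : c = '-'
    · subst h
      have hA : fixAList ('-' :: d :: rest) = fixAList (d :: rest) := by simp [fixAList]
      have htw : ((('-' : Char) :: d :: rest).takeWhile (fun c => (c = '-' : Bool))).length
          = ((d :: rest).takeWhile (fun c => (c = '-' : Bool))).length + 1 := by
        simp [List.takeWhile_cons]
      rw [hA, fixA_eq (d :: rest), htw]
      have hmin : min (((d :: rest).takeWhile (fun c => (c = '-' : Bool))).length + 1)
          ((('-' : Char) :: d :: rest).length - 1)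
          = min ((d :: rest).takeWhile (fun c => (c = '-' : Bool))).length
            ((d :: rest).length - 1) + 1 := by
        simp only [List.length_cons]; omega
      rw [hmin, List.drop_succ_cons]
    · have hA : fixAList (c :: d :: rest) = c :: d :: rest := by simp [fixAList, h]
      have htw : ((c :: d :: rest).takeWhile (fun c => (c = '-' : Bool))).length = 0 := by
        simp [h]
      rw [hA, htw]
      simp

-- ===== VERDICT (by name: the statement is the Claim_ definition above) =====
theorem fix_par_name_spec : Claim_equal_fix_par_name := by
  intro p _ hpre
  unfold Spec_fix_par_name fix_par_name fix_par_name_alt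
  have hpre' : p ≠ "" := hpre
  have hl : p.toList ≠ [] := by simp [hpre']
  set l := p.toList with hldef
  set k : Nat := (l.takeWhile (fun c => c = '-')).length with hk
  have hsplit : (l.takeWhile (fun c => c = '-')).length
      + (l.dropWhile (fun c => c = '-')).length = l.length := by
    have h := congrArg List.length
      (List.takeWhile_append_dropWhile (p := fun c => (c = '-' : Bool)) (l := l))
    rw [List.length_append] at h
    exact h
  have hk_le : k ≤ l.length := by omega
  have hlen : 1 ≤ l.length := by
    rcases Nat.eq_zero_or_pos l.length with h0 | h1
    · exact absurd (List.eq_nil_of_length_eq_zero h0) hl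
    · exact h1
  have hd : (l.length : Int) - ((l.dropWhile (fun c => c = '-')).length : Int) = (k : Int) := by
    omega
  simp only [hd]
  have ha : (0:Int) ≤ min (k : Int) ((l.length : Int) - 1) := by omega
  rw [PySem.List.slice_from l ha]
  have hnat : (min (k : Int) ((l.length : Int) - 1)).toNat = min k (l.length - 1) := by
    omega
  rw [hnat, fixA_eq]
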